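-- pv_equiv track=rewrite | github.com/SauravSinha76/scaler | contest1/count_vovel.py | solve
-- ===== SOURCE A (Python) =====
-- def solve(A,B):
--     psum = [0] * len(A)
--     vovel ="aeiou"
--     for i in range(len(A)):
--         if A[i] in vovel:
--             psum[i] += 1
--
--         if i != 0:
--             psum[i] += psum[i-1]
--
--
--     ans = []
--     for i in range(len(B)):
--         l = B[i][0]
--         r = B[i][1]
--
--         if l == 0:
--             ans.append(psum[r])
--         else:
--             ans.append(psum[r] - psum[l-1])
--
--     return ans
-- ===== SOURCE B (Python) =====
-- def vowel_count(A, i):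
--     """Vowels in A up to and including index i (negative i counts from the end)."""
--     return sum(c in "aeiou" for c in A[: i + 1 or None])
--
--
-- def solve(A, B):
--     return [vowel_count(A, q[1]) - (vowel_count(A, q[0] - 1) if q[0] else 0)
--             for q in B]
-- ===== Notes on version B (the rewrite author's own statement) =====
-- stated objective: simpler
-- what changed: Drops A's precomputed prefix-sum table: each query is answered independently by slicing the string inclusively up to the query index and counting vowels in that slice, as a one-line comprehension.
import Mathlib
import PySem

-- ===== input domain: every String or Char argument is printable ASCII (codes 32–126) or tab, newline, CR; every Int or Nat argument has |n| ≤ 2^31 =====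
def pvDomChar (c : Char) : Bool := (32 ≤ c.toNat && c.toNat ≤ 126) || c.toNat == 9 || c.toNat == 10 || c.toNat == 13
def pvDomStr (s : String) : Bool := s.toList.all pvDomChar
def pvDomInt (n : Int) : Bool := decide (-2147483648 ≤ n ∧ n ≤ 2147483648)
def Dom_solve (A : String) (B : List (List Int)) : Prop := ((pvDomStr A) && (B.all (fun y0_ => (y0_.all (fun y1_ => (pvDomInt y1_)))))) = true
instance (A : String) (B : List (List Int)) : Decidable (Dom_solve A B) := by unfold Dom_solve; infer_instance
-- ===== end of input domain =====

-- B drops A's precomputed prefix-sum table: each query is answered independently by counting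
-- vowels in an inclusive slice of the string (simpler; equivalence proved on all inputs on which
-- A raises no IndexError — Pre_solve below).

-- ===== PORT A =====
def pvVowels : List Char := ['a', 'e', 'i', 'o', 'u']

-- one iteration of A's first loop (i ranges over range(len(A)), so all indices are in range)
def pvStepA (cs : List Char) (p : List Int) (i : Nat) : List Int :=
  let p1 := if cs.getD i ' ' ∈ pvVowels then p.set i (p.getD i 0 + 1) else p
  if i ≠ 0 then p1.set i (p1.getD i 0 + p1.getD (i - 1) 0) else p1

def solve (A : String) (B : List (List Int)) : List Int :=
  let cs := A.toList
  let psum := (List.range cs.length).foldl (pvStepA cs) (List.replicate cs.length 0)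
  -- second loop: B[i][0] / B[i][1] / psum[...] would raise IndexError out of range; Pre_solve excludes that
  B.foldl (fun ans q =>
    let l := PySem.List.pyGetD q 0 0
    let r := PySem.List.pyGetD q 1 0
    ans ++ [if l = 0 then PySem.List.pyGetD psum r 0
            else PySem.List.pyGetD psum r 0 - PySem.List.pyGetD psum (l - 1) 0]) []

-- ===== PORT B =====
-- vowel_count(A, i): vowels in A[: i + 1 or None] — the inclusive-slice idiom ('or None' so
-- that i = -1 means the whole string)
def pvVowelCount (A : String) (i : Int) : Int :=
  ((PySem.List.slice A.toList none
      (if i + 1 = 0 then none else some (i + 1))).countP (· ∈ pvVowels) : Int)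

def solve_alt (A : String) (B : List (List Int)) : List Int :=
  B.map (fun q =>
    pvVowelCount A (PySem.List.pyGetD q 1 0) -
      (if PySem.List.pyGetD q 0 0 ≠ 0 then pvVowelCount A (PySem.List.pyGetD q 0 0 - 1) else 0))

-- ===== PRECONDITION & SPEC =====
-- Pre_solve: exactly the inputs where A returns normally — each query has at least two entries
-- and its index accesses psum[r] and (for l ≠ 0) psum[l-1] are in range under Python's
-- negative-index rule; otherwise A raises IndexError.
def Pre_solve (A : String) (B : List (List Int)) : Prop :=
  ∀ q ∈ B, 2 ≤ q.length ∧
    (-(A.toList.length : Int) ≤ q.getD 1 0 ∧ q.getD 1 0 < (A.toList.length : Int)) ∧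
    (q.getD 0 0 = 0 ∨
      (-(A.toList.length : Int) ≤ q.getD 0 0 - 1 ∧ q.getD 0 0 - 1 < (A.toList.length : Int)))
instance (A : String) (B : List (List Int)) : Decidable (Pre_solve A B) := by
  unfold Pre_solve; infer_instance

def pvWitness_solve : String × List (List Int) := ("hello", [[0, 4], [1, 2], [-2, -1]])

def Spec_solve (A : String) (B : List (List Int)) (out : List Int) : Prop := out = solve_alt A B
instance (A : String) (B : List (List Int)) (out : List Int) : Decidable (Spec_solve A B out) := by
  unfold Spec_solve; infer_instance

-- ===== CLAIM (what is proved, stated in full; the proofs are below) =====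
def Claim_equal_solve : Prop :=
  ∀ (A : String) (B : List (List Int)), Dom_solve A B → Pre_solve A B → Spec_solve A B (solve A B)

-- ===== LEMMAS AND PROOFS =====

-- number of vowels among the first k characters

def pvVcnt (cs : List Char) (k : Nat) : Int := ((cs.take k).countP (· ∈ pvVowels) : Int)

theorem pvVcnt_zero (cs : List Char) : pvVcnt cs 0 = 0 := by simp [pvVcnt]

theorem pvVcnt_succ (cs : List Char) (k : Nat) (h : k < cs.length) :
    pvVcnt cs (k + 1) = pvVcnt cs k + (if cs.getD k ' ' ∈ pvVowels then 1 else 0) := by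
  have ht : cs.take (k + 1) = cs.take k ++ [cs[k]] := by
    rw [List.take_add_one]; simp [List.getElem?_eq_getElem h]
  have hg : cs.getD k ' ' = cs[k] := List.getD_eq_getElem cs ' ' h
  rw [pvVcnt, pvVcnt, ht, List.countP_append, hg]
  push_cast [List.countP_cons, List.countP_nil]
  split <;> simp_all

theorem pv_set_append_len {α : Type} (xs : List α) (y : α) (ys : List α) (v : α) :
    (xs ++ y :: ys).set xs.length v = xs ++ v :: ys := by
  induction xs with
  | nil => simp
  | cons a t ih => simp [ih]

theorem pv_getD_append_len {α : Type} (xs : List α) (y : α) (ys : List α) (d : α) :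
    (xs ++ y :: ys).getD xs.length d = y := by
  induction xs with
  | nil => simp
  | cons a t ih => simp

theorem pv_getD_append_lt {α : Type} (xs ys : List α) (i : Nat) (d : α) (h : i < xs.length) :
    (xs ++ ys).getD i d = xs.getD i d := by
  simp [List.getD, List.getElem?_append_left h]

theorem pv_getD_map_range {α : Type} (f : Nat → α) (n i : Nat) (d : α) (h : i < n) :
    (((List.range n).map f).getD i d) = f i := by
  rw [List.getD_eq_getElem _ _ (by simpa using h)]
  simp

theorem pvPsum_invariant (cs : List Char) (k : Nat) (hk : k ≤ cs.length) :
    (List.range k).foldl (pvStepA cs) (List.replicate cs.length 0) =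
      (List.range k).map (fun i => pvVcnt cs (i + 1)) ++ List.replicate (cs.length - k) 0 := by
  induction k with
  | zero => simp
  | succ k ih =>
    have hk' : k < cs.length := hk
    have ihe := ih (Nat.le_of_lt hk')
    rw [List.range_succ, List.foldl_append, ihe]
    set M := (List.range k).map (fun i => pvVcnt cs (i + 1)) with hM
    have hMlen : k = M.length := by simp [hM]
    have hrep : List.replicate (cs.length - k) (0 : Int) =
        0 :: List.replicate (cs.length - (k + 1)) 0 := by
      have : cs.length - k = (cs.length - (k + 1)) + 1 := by omega
      rw [this, List.replicate_succ]
    rw [hrep]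
    simp only [List.foldl_cons, List.foldl_nil]
    have hv : pvStepA cs (M ++ 0 :: List.replicate (cs.length - (k + 1)) 0) k =
        M ++ pvVcnt cs (k + 1) :: List.replicate (cs.length - (k + 1)) 0 := by
      unfold pvStepA
      set R := List.replicate (cs.length - (k + 1)) (0 : Int) with hR
      set v : Int := if cs.getD k ' ' ∈ pvVowels then 1 else 0 with hvdef
      have hg0 : (M ++ (0 : Int) :: R).getD k 0 = 0 := by
        rw [hMlen]; exact pv_getD_append_len ..
      have hs0 : (M ++ (0 : Int) :: R).set k 1 = M ++ 1 :: R := by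
        rw [hMlen]; exact pv_set_append_len ..
      have h1 : (if cs.getD k ' ' ∈ pvVowels then
          (M ++ 0 :: R).set k ((M ++ 0 :: R).getD k 0 + 1) else (M ++ 0 :: R)) =
          M ++ v :: R := by
        rw [hg0, hvdef]
        split
        · simpa using hs0
        · rfl
      rw [h1]
      have hval : v + pvVcnt cs k = pvVcnt cs (k + 1) := by
        rw [pvVcnt_succ cs k hk', hvdef]; ring
      by_cases hk0 : k = 0
      · rw [if_neg (by simp [hk0])]
        have hM0 : M = [] := by
          have : M.length = 0 := by omega
          exact List.eq_nil_of_length_eq_zero this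
        rw [hM0]
        simp only [List.nil_append]
        have : pvVcnt cs (k + 1) = v := by
          rw [← hval, hk0, pvVcnt_zero]; ring
        rw [this]
      · rw [if_pos hk0]
        have hgk : (M ++ v :: R).getD k 0 = v := by
          rw [hMlen]; exact pv_getD_append_len ..
        have hgk1 : (M ++ v :: R).getD (k - 1) 0 = pvVcnt cs k := by
          rw [pv_getD_append_lt _ _ _ _ (by omega)]
          rw [hM, pv_getD_map_range _ _ _ _ (by omega)]
          congr 1; omega
        have hset : (M ++ v :: R).set k (v + pvVcnt cs k) = M ++ (v + pvVcnt cs k) :: R := by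
          rw [hMlen]; exact pv_set_append_len ..
        rw [hgk, hgk1, hset, hval]
    rw [hv]
    simp [List.map_append, hM]

-- Python's normalisation of index i into a list of length n (valid when -n ≤ i < n)
def pvNorm (n : Nat) (i : Int) : Nat := (if i < 0 then i + n else i).toNat

theorem pvGetD_map_range_pyIdx (f : Nat → Int) (n : Nat) (i : Int)
    (h1 : -(n : Int) ≤ i) (h2 : i < (n : Int)) :
    PySem.List.pyGetD ((List.range n).map f) i 0 = f (pvNorm n i) := by
  by_cases hi : i < 0
  · have hi' : i = -(((-i).toNat : Nat) : Int) := by omega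
    rw [hi', PySem.List.pyGetD_neg_natCast _ _ _ (by omega) (by simp; omega)]
    simp only [List.getElem_map, List.getElem_range, List.length_map, List.length_range]
    congr 1
    simp only [pvNorm]
    omega
  · rw [PySem.List.pyGetD_eq_getElem _ _ (by omega) (by simpa using h2)]
    simp only [List.getElem_map, List.getElem_range]
    congr 1
    simp only [pvNorm, if_neg hi]

theorem pvCount_eq (A : String) (i : Int) (h1 : -(A.toList.length : Int) ≤ i)
    (_h2 : i < (A.toList.length : Int)) :
    pvVowelCount A i = pvVcnt A.toList (pvNorm A.toList.length i + 1) := by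
  unfold pvVowelCount pvVcnt
  set cs := A.toList with hcs
  by_cases h0 : i + 1 = 0
  · rw [if_pos h0, PySem.List.slice_none_none]
    have hn : pvNorm cs.length i + 1 = cs.length := by
      unfold pvNorm; omega
    rw [hn, List.take_length]
  · rw [if_neg h0]
    by_cases hpos : 0 ≤ i
    · rw [PySem.List.slice_to _ (by omega)]
      have hn : (i + 1).toNat = pvNorm cs.length i + 1 := by unfold pvNorm; omega
      rw [hn]
    · have hk : i + 1 = -(((-(i + 1)).toNat : Nat) : Int) := by omega
      rw [hk, PySem.List.slice_to_neg_natCast _ _ (by omega)]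
      have hn : cs.length - (-(i + 1)).toNat = pvNorm cs.length i + 1 := by
        unfold pvNorm; omega
      rw [hn]

theorem pv_query_eq (A : String) (q : List Int) (_hlen : 2 ≤ q.length)
    (hr : -(A.toList.length : Int) ≤ q.getD 1 0 ∧ q.getD 1 0 < (A.toList.length : Int))
    (hl : q.getD 0 0 = 0 ∨
      (-(A.toList.length : Int) ≤ q.getD 0 0 - 1 ∧ q.getD 0 0 - 1 < (A.toList.length : Int))) :
    (let l := PySem.List.pyGetD q 0 0
     let r := PySem.List.pyGetD q 1 0
     let psum := (List.range A.toList.length).foldl (pvStepA A.toList)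
        (List.replicate A.toList.length 0)
     if l = 0 then PySem.List.pyGetD psum r 0
     else PySem.List.pyGetD psum r 0 - PySem.List.pyGetD psum (l - 1) 0) =
    pvVowelCount A (PySem.List.pyGetD q 1 0) -
      (if PySem.List.pyGetD q 0 0 ≠ 0 then pvVowelCount A (PySem.List.pyGetD q 0 0 - 1)
       else 0) := by
  have hq0 : PySem.List.pyGetD q 0 (0 : Int) = q.getD 0 0 := PySem.List.pyGetD_zero q 0
  have hq1 : PySem.List.pyGetD q 1 (0 : Int) = q.getD 1 0 :=
    PySem.List.pyGetD_ofNat' q 1 0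
  set cs := A.toList with hcs
  have hpsum : (List.range cs.length).foldl (pvStepA cs) (List.replicate cs.length 0) =
      (List.range cs.length).map (fun i => pvVcnt cs (i + 1)) := by
    have h := pvPsum_invariant cs cs.length (le_refl _)
    rw [Nat.sub_self, List.replicate_zero, List.append_nil] at h
    exact h
  simp only [hq0, hq1, hpsum]
  have hrv : PySem.List.pyGetD ((List.range cs.length).map (fun i => pvVcnt cs (i + 1)))
      (q.getD 1 0) 0 = pvVowelCount A (q.getD 1 0) := by
    rw [pvGetD_map_range_pyIdx _ _ _ hr.1 hr.2, pvCount_eq A _ hr.1 hr.2]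
  by_cases hl0 : q.getD 0 0 = 0
  · rw [if_pos hl0, if_neg (fun h => h hl0), hrv]
    ring
  · obtain hl' := hl.resolve_left hl0
    rw [if_neg hl0, if_pos hl0, hrv]
    rw [pvGetD_map_range_pyIdx _ _ _ hl'.1 hl'.2, pvCount_eq A _ hl'.1 hl'.2]

-- ===== VERDICT (by name: the statement is the Claim_ definition above) =====
theorem solve_spec : Claim_equal_solve := by
  intro A B hDom hPre
  unfold Spec_solve solve solve_alt
  rw [PySem.List.foldl_append_singleton_eq_map]
  simp only [List.nil_append]
  apply List.map_congr_left
  intro q hq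
  obtain ⟨hlen2, hr, hl⟩ := hPre q hq
  exact pv_query_eq A q hlen2 hr hl
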